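-- pv_equiv track=rewrite | github.com/Hadar933/Intro_to_CS | ex5_matrix/wordsearch.py | direction_x
-- ===== SOURCE A (Python) =====
-- def direction_x(word_list, matrix):
--     """
--     checks presence of words in the given direction
--     :param word_list: words to search
--     :param matrix: given matrix
--     :return: list of the words that are in the matrix in the given direction
--     """
--     x_list = []
--     for col in range(len(matrix[0])-1,-1,-1):
--         for row in range(len(matrix)-1,-1,-1):
--             for word in word_list:
--                 found_word = True
--                 match_len = 0
--                 for i in range(len(word)):
--                     if col - i <0 or row - i <0:
--                         break
--                     if word[i] != matrix[row-i][col-i]: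
--                         found_word=False
--                         break
--                     match_len += 1
--                 if (match_len == len(word)) and (found_word is True):
--                     x_list.append(word)
--     return x_list
-- ===== SOURCE B (Python) =====
-- def direction_x(word_list, matrix):
--     """
--     checks presence of words in the given direction
--     :param word_list: words to search
--     :param matrix: given matrix
--     :return: list of the words that are in the matrix in the given direction
--     """
--     rows, cols = len(matrix), len(matrix[0])
--     cap = max((len(w) for w in word_list), default=0)
--     # diag[r][c] = the up-left diagonal cells starting at (r,c), capped at the longest word
--     diag = []
--     prev = [[]] * cols
--     for r in range(rows):
--         cur = [([cell] + p)[:cap] for cell, p in zip(matrix[r], [[]] + prev)]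
--         diag.append(cur)
--         prev = cur
--     result = []
--     for col in range(cols - 1, -1, -1):
--         for row in range(rows - 1, -1, -1):
--             d = diag[row][col]
--             result += [w for w in word_list if list(w) == d[:len(w)]]
--     return result
-- ===== Notes on version B (the rewrite author's own statement) =====
-- stated objective: alternative
-- what changed: A rescans the matrix up-left once per word per cell with flag/counter break logic; B makes one DP pass that precomputes each cell's up-left diagonal (capped at the longest word) via its upper-left neighbour and then emits words by a plain prefix comparison against that precomputed list.
-- outside the precondition, e.g. on direction_x([''], [['a', 'b'], ['x']]): A returns ['', '', '', ''], B raises IndexError; on direction_x(['a'], [['b', 'b'], ['x']]): A raises IndexError, B raises IndexError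
import Mathlib
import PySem

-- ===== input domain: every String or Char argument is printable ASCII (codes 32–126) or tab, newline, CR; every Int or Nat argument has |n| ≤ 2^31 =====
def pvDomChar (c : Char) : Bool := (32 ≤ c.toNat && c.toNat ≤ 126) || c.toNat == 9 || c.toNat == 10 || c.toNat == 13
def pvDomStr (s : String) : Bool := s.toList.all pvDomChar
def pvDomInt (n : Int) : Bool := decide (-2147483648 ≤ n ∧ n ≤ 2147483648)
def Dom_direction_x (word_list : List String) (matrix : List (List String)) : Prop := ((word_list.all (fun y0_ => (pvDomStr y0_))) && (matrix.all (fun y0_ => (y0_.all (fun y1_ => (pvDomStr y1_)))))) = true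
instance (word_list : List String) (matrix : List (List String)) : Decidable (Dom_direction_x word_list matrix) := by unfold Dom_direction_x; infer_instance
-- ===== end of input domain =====

-- B replaces A's per-word per-cell up-left rescans by one DP pass that precomputes each
-- cell's up-left diagonal (capped at the longest word) and then prefix-compares;
-- alternative decomposition of the same asymptotic cost, not claimed faster.

-- ===== PORT A =====
-- matrix[x][y]; the `getD` defaults are never reached on inputs satisfying
-- Pre_direction_x (A checks the indices nonneg, and they are < the row length under Pre_).
def dxCell (matrix : List (List String)) (x y : Int) : String :=
  (PySem.List.pyGet? ((PySem.List.pyGet? matrix x).getD []) y).getD ""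

-- the `for i in range(len(word))` loop with its two breaks; returns
-- (found_word, match_len counted from the current position i)
def dxScan (matrix : List (List String)) (row col : Int) (i : Int) : List Char → Bool × Int
  | [] => (true, 0)
  | ch :: rest =>
    if col - i < 0 ∨ row - i < 0 then (true, 0)
    else if ¬ (String.ofList [ch] = dxCell matrix (row - i) (col - i)) then (false, 0)
    else
      let p := dxScan matrix row col (i + 1) rest
      (p.1, p.2 + 1)

def direction_x (word_list : List String) (matrix : List (List String)) : List String :=
  let cols : Int := (((PySem.List.pyGet? matrix 0).getD []).length : Int)
  let rows : Int := (matrix.length : Int)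
  (PySem.List.pyRange (cols - 1) (-1) (-1)).foldl (fun x_list col =>
    (PySem.List.pyRange (rows - 1) (-1) (-1)).foldl (fun x_list row =>
      word_list.foldl (fun x_list word =>
        let p := dxScan matrix row col 0 word.toList
        if p.2 = (word.toList.length : Int) ∧ p.1 = true then x_list ++ [word] else x_list)
        x_list) x_list) []

-- ===== PORT B =====
-- one row of the DP table: cur[c] = ([matrix[r][c]] + prev[c-1])[:cap], via zip with [[]]+prev
def dxRowDiag (cap : Nat) (row : List String) (prev : List (List String)) : List (List String) :=
  (row.zip ([] :: prev)).map (fun cp => (cp.1 :: cp.2).take cap)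

-- the `for r in range(rows)` loop building diag
def dxTable (cap : Nat) (prev : List (List String)) : List (List String) → List (List (List String))
  | [] => []
  | row :: rest =>
    let cur := dxRowDiag cap row prev
    cur :: dxTable cap cur rest

def direction_x_alt (word_list : List String) (matrix : List (List String)) : List String :=
  let cols : Int := (((PySem.List.pyGet? matrix 0).getD []).length : Int)
  let rows : Int := (matrix.length : Int)
  let cap : Nat := word_list.foldl (fun acc w => max acc w.toList.length) 0
  let table := dxTable cap (List.replicate cols.toNat []) matrix
  (PySem.List.pyRange (cols - 1) (-1) (-1)).foldl (fun result col =>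
    (PySem.List.pyRange (rows - 1) (-1) (-1)).foldl (fun result row =>
      let d := (PySem.List.pyGet? ((PySem.List.pyGet? table row).getD []) col).getD []
      result ++ word_list.filter
        (fun w => decide (w.toList.map (fun ch => String.ofList [ch]) = d.take w.toList.length)))
      result) []

-- ===== PRECONDITION & SPEC =====
-- Pre_ excludes the empty matrix (A raises IndexError on matrix[0]) and matrices having
-- a row shorter than the first row, on which A raises IndexError whenever the up-left
-- scan reaches a missing cell — i.e. whenever any word is nonempty — and returns only
-- in the degenerate all-words-empty case.
def Pre_direction_x (word_list : List String) (matrix : List (List String)) : Prop :=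
  matrix ≠ [] ∧ ∀ row ∈ matrix, (matrix.getD 0 []).length ≤ row.length

instance (word_list : List String) (matrix : List (List String)) : Decidable (Pre_direction_x word_list matrix) := by unfold Pre_direction_x; infer_instance

def pvWitness_direction_x : List String × List (List String) :=
  (["ab", "b", ""], [["a", "b"], ["b", "a"]])

def Spec_direction_x (word_list : List String) (matrix : List (List String)) (out : List String) : Prop := out = direction_x_alt word_list matrix
instance (word_list : List String) (matrix : List (List String)) (out : List String) : Decidable (Spec_direction_x word_list matrix out) := by unfold Spec_direction_x; infer_instance

-- ===== CLAIM (what is proved, stated in full; the proofs are below) =====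
def Claim_equal_direction_x : Prop := ∀ (word_list : List String) (matrix : List (List String)), Dom_direction_x word_list matrix → Pre_direction_x word_list matrix → Spec_direction_x word_list matrix (direction_x word_list matrix)

-- ===== LEMMAS AND PROOFS =====

-- the up-left diagonal starting at cell (r, c), capped at cap — what B's table holds
def dSpec (m : List (List String)) (cap r c : Nat) : List String :=
  ((List.range (min r c + 1)).map (fun i => (m.getD (r - i) []).getD (c - i) "")).take cap

theorem take_cons_take {α : Type} (cap : Nat) (x : α) (l : List α) :
    ((x :: l.take cap).take cap) = (x :: l).take cap := by
  cases cap with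
  | zero => simp
  | succ n => simp [List.take_succ_cons, List.take_take]

theorem dxRowDiag_getD (cap : Nat) (row : List String) (prev : List (List String))
    (c : Nat) (hc : c < row.length) (hc' : c < prev.length + 1) :
    (dxRowDiag cap row prev).getD c [] =
      ((row.getD c "") :: (([] :: prev).getD c [])).take cap := by
  have hz : c < (row.zip ([] :: prev)).length := by simp; omega
  have h2 : c < ([] :: prev).length := by simpa using hc'
  unfold dxRowDiag
  rw [List.getD_eq_getElem _ _ (by simpa using hz),
      List.getD_eq_getElem _ _ hc, List.getD_eq_getElem _ _ h2]
  simp [List.getElem_zip]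

theorem dxRowDiag_spec (m : List (List String)) (cap C : Nat) (r0 : Nat) (row : List String)
    (prev : List (List String))
    (hrow : m[r0]?.getD [] = row) (hlen : C ≤ row.length) (hprev : C ≤ prev.length)
    (hspec : ∀ c < C, prev.getD c [] = if r0 = 0 then [] else dSpec m cap (r0 - 1) c)
    (c : Nat) (hc : c < C) :
    (dxRowDiag cap row prev).getD c [] = dSpec m cap r0 c := by
  rw [dxRowDiag_getD cap row prev c (by omega) (by omega)]
  cases c with
  | zero =>
    simp [dSpec, List.getD, hrow]
  | succ c =>
    have h1 : ([] :: prev).getD (c + 1) [] = prev.getD c [] := rfl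
    rw [h1, hspec c (by omega)]
    cases r0 with
    | zero => simp [dSpec, List.getD, hrow]
    | succ r0 =>
      rw [if_neg (by omega)]
      unfold dSpec
      rw [take_cons_take]
      congr 1
      have hmin : min (r0 + 1) (c + 1) = min r0 c + 1 := by omega
      conv_rhs => rw [hmin, List.range_succ_eq_map, List.map_cons, List.map_map]
      congr 1
      · simp [List.getD, hrow]
      · have hm2 : min (r0 + 1 - 1) c = min r0 c := by omega
        rw [hm2]
        apply List.map_congr_left
        intro i _
        simp only [Function.comp_apply]
        have e1 : r0 + 1 - 1 - i = r0 + 1 - (i + 1) := by omega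
        have e2 : c - i = c + 1 - (i + 1) := by omega
        rw [e1, e2]

theorem dxTable_spec (m : List (List String)) (cap C : Nat)
    (hC : ∀ row ∈ m, C ≤ row.length) :
    ∀ (r : Nat) (rest : List (List String)) (r0 : Nat) (prev : List (List String)),
      rest = m.drop r0 →
      C ≤ prev.length →
      (∀ c < C, prev.getD c [] = if r0 = 0 then [] else dSpec m cap (r0 - 1) c) →
      ∀ c, r0 + r < m.length → c < C →
        ((dxTable cap prev rest).getD r []).getD c [] = dSpec m cap (r0 + r) c := by
  intro r
  induction r with
  | zero =>
    intro rest r0 prev hrest hplen hpspec c hr hc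
    have hr0 : r0 < m.length := by omega
    have hne : rest ≠ [] := by rw [hrest]; simp [List.drop_eq_nil_iff]; omega
    obtain ⟨row, rest', hcons⟩ := List.exists_cons_of_ne_nil hne
    have hrowq : m[r0]? = some row := by
      have h0 : rest[0]? = some row := by simp [hcons]
      rw [hrest] at h0
      simpa using h0
    have hrow : m[r0]?.getD [] = row := by simp [hrowq]
    have hmem : row ∈ m := List.mem_of_getElem? hrowq
    subst hcons
    have h0 : (dxTable cap prev (row :: rest')).getD 0 [] = dxRowDiag cap row prev := rfl
    rw [h0, Nat.add_zero]
    exact dxRowDiag_spec m cap C r0 row prev hrow (hC row hmem) hplen hpspec c hc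
  | succ r ih =>
    intro rest r0 prev hrest hplen hpspec c hr hc
    have hr0 : r0 < m.length := by omega
    have hne : rest ≠ [] := by rw [hrest]; simp [List.drop_eq_nil_iff]; omega
    obtain ⟨row, rest', hcons⟩ := List.exists_cons_of_ne_nil hne
    have hrowq : m[r0]? = some row := by
      have h0 : rest[0]? = some row := by simp [hcons]
      rw [hrest] at h0
      simpa using h0
    have hrow : m[r0]?.getD [] = row := by simp [hrowq]
    have hmem : row ∈ m := List.mem_of_getElem? hrowq
    subst hcons
    have hrest' : rest' = m.drop (r0 + 1) := by
      have h1 : (row :: rest').drop 1 = (m.drop r0).drop 1 := by rw [← hrest]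
      simpa [List.drop_drop, Nat.add_comm] using h1
    have hcur_len : C ≤ (dxRowDiag cap row prev).length := by
      have := hC row hmem
      simp [dxRowDiag]
      omega
    have hcur_spec : ∀ c' < C, (dxRowDiag cap row prev).getD c' [] =
        if r0 + 1 = 0 then [] else dSpec m cap (r0 + 1 - 1) c' := by
      intro c' hc'
      rw [if_neg (by omega)]
      simpa using dxRowDiag_spec m cap C r0 row prev hrow (hC row hmem) hplen hpspec c' hc'
    have hres := ih rest' (r0 + 1) (dxRowDiag cap row prev) hrest' hcur_len hcur_spec c (by omega) hc
    show ((dxTable cap (dxRowDiag cap row prev) rest').getD r []).getD c [] = dSpec m cap (r0 + (r + 1)) c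
    rw [hres.trans]
    congr 1
    omega

theorem dxCell_natCast (m : List (List String)) (a b : Nat) :
    dxCell m (a : Int) (b : Int) = (m.getD a []).getD b "" := by
  simp [dxCell, List.getD]

theorem dxScan_spec (m : List (List String)) (r c : Nat) :
    ∀ (chars : List Char) (i : Nat),
      ((dxScan m (r : Int) (c : Int) (i : Int) chars).1 = true ∧
        (dxScan m (r : Int) (c : Int) (i : Int) chars).2 = (chars.length : Int)) ↔
      (∀ j, (hj : j < chars.length) →
        i + j ≤ min r c ∧
          String.ofList [chars[j]] = (m.getD (r - (i + j)) []).getD (c - (i + j)) "") := by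
  intro chars
  induction chars with
  | nil => intro i; simp [dxScan]
  | cons ch rest ih =>
    intro i
    simp only [dxScan]
    by_cases hb : (c : Int) - (i : Int) < 0 ∨ (r : Int) - (i : Int) < 0
    · rw [if_pos hb]
      constructor
      · intro h
        exfalso
        have h2 := h.2
        simp only [List.length_cons] at h2
        push_cast at h2
        omega
      · intro h
        exfalso
        have := (h 0 (by simp)).1
        omega
    · rw [if_neg hb]
      have hble : i ≤ min r c := by omega
      have h1 : (r : Int) - (i : Int) = ((r - i : Nat) : Int) := by omega
      have h2 : (c : Int) - (i : Int) = ((c - i : Nat) : Int) := by omega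
      have hcell : dxCell m ((r : Int) - (i : Int)) ((c : Int) - (i : Int)) =
          (m.getD (r - i) []).getD (c - i) "" := by rw [h1, h2, dxCell_natCast]
      by_cases hm : String.ofList [ch] = dxCell m ((r : Int) - (i : Int)) ((c : Int) - (i : Int))
      · rw [if_neg (not_not_intro hm)]
        have hcast : ((i : Int) + 1) = ((i + 1 : Nat) : Int) := by push_cast; ring
        rw [hcast]
        constructor
        · intro h
          have hq2 : (dxScan m (r : Int) (c : Int) ((i + 1 : Nat) : Int) rest).2 = (rest.length : Int) := by
            have h2' := h.2
            simp only [List.length_cons] at h2'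
            push_cast at h2' ⊢
            omega
          have h' := (ih (i + 1)).mp ⟨h.1, hq2⟩
          intro j hj
          cases j with
          | zero =>
            refine ⟨by omega, ?_⟩
            simpa [hcell] using hm
          | succ j =>
            have hj' := h' j (by simpa using hj)
            refine ⟨by omega, ?_⟩
            have e : i + (j + 1) = i + 1 + j := by omega
            rw [e]
            simpa using hj'.2
        · intro h
          have h' : ∀ j, (hj : j < rest.length) →
              (i + 1) + j ≤ min r c ∧
              String.ofList [rest[j]] = (m.getD (r - ((i + 1) + j)) []).getD (c - ((i + 1) + j)) "" := by
            intro j hj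
            have hh := h (j + 1) (by simpa using hj)
            refine ⟨by omega, ?_⟩
            have e : i + (j + 1) = i + 1 + j := by omega
            rw [e] at hh
            simpa using hh.2
          have hres := (ih (i + 1)).mpr h'
          refine ⟨hres.1, ?_⟩
          have := hres.2
          simp only [List.length_cons]
          push_cast at this ⊢
          omega
      · rw [if_pos hm]
        constructor
        · intro h; exact absurd h.1 (by simp)
        · intro h
          exfalso
          apply hm
          rw [hcell]
          simpa using (h 0 (by simp)).2

theorem prefix_char (m : List (List String)) (cap r c : Nat) (w : List Char)
    (hcap : w.length ≤ cap) :
    (w.map (fun ch => String.ofList [ch]) = (dSpec m cap r c).take w.length) ↔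
    (∀ j, (hj : j < w.length) →
      j ≤ min r c ∧ String.ofList [w[j]] = (m.getD (r - j) []).getD (c - j) "") := by
  have hrw : (dSpec m cap r c).take w.length =
      (List.range (min (w.length) (min r c + 1))).map
        (fun i => (m.getD (r - i) []).getD (c - i) "") := by
    unfold dSpec
    rw [List.take_take, Nat.min_eq_left hcap, ← List.map_take, List.take_range]
  rw [hrw]
  constructor
  · intro h j hj
    have hlen := congrArg List.length h
    simp only [List.length_map, List.length_range] at hlen
    have hK : w.length ≤ min r c + 1 := by omega
    refine ⟨by omega, ?_⟩
    have hgj := congrArg (fun l => l[j]?) h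
    simp only [List.getElem?_map] at hgj
    have hj2 : j < min w.length (min r c + 1) := by omega
    rw [List.getElem?_eq_getElem hj, List.getElem?_range hj2] at hgj
    simpa using hgj
  · intro h
    have hK : w.length ≤ min r c + 1 := by
      cases Nat.eq_zero_or_pos w.length with
      | inl h0 => omega
      | inr h0 =>
        have := (h (w.length - 1) (by omega)).1
        omega
    apply List.ext_getElem
    · simp; omega
    · intro j hj1 hj2
      simp only [List.getElem_map, List.getElem_range]
      exact (h j (by simpa using hj1)).2

-- ===== VERDICT (by name: the statement is the Claim_ definition above) =====
theorem direction_x_spec : Claim_equal_direction_x := by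
  unfold Claim_equal_direction_x
  intro wl m _hDom hPre
  obtain ⟨hne, hrows⟩ := hPre
  show direction_x wl m = direction_x_alt wl m
  unfold direction_x direction_x_alt
  simp only []
  have hget0 : PySem.List.pyGet? m 0 = m[0]? := by
    simpa using PySem.List.pyGet?_natCast m (0 : Nat)
  set C : Nat := ((PySem.List.pyGet? m 0).getD []).length with hC
  set R : Nat := m.length with hR
  have hCrow : ∀ row ∈ m, C ≤ row.length := by
    intro row hrow
    have := hrows row hrow
    simpa [hC, hget0, List.getD] using this
  set cap : Nat := wl.foldl (fun acc w => max acc w.toList.length) 0 with hcap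
  have hwcap : ∀ w ∈ wl, w.toList.length ≤ cap :=
    (PySem.List.le_foldl_max_nat wl (fun w => w.toList.length) 0).2
  apply PySem.List.foldl_congr_mem
  intro acc col hcol
  apply PySem.List.foldl_congr_mem
  intro acc2 row hrow
  rw [PySem.List.mem_pyRange_neg_one] at hcol hrow
  obtain ⟨c, rfl⟩ : ∃ c : Nat, col = (c : Int) := ⟨col.toNat, (Int.toNat_of_nonneg (by omega)).symm⟩
  obtain ⟨r, rfl⟩ : ∃ r : Nat, row = (r : Int) := ⟨row.toNat, (Int.toNat_of_nonneg (by omega)).symm⟩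
  have hcC : c < C := by omega
  have hrR : r < R := by omega
  -- B's table entry at (r, c) is the capped up-left diagonal
  have htbl : (PySem.List.pyGet? ((PySem.List.pyGet? (dxTable cap (List.replicate ((C : Int)).toNat []) m) (r : Int)).getD []) (c : Int)).getD []
      = dSpec m cap r c := by
    have hd := dxTable_spec m cap C hCrow r m 0 (List.replicate ((C : Int)).toNat []) (by simp)
      (by simp) (by intro c' hc'; simp) c (by omega) hcC
    simpa [List.getD] using hd
  rw [htbl]
  rw [PySem.List.foldl_append_ite_eq_filter]
  congr 1
  apply List.filter_congr
  intro w hw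
  have hiff : ((dxScan m (r : Int) (c : Int) 0 w.toList).2 = (w.toList.length : Int) ∧
      (dxScan m (r : Int) (c : Int) 0 w.toList).1 = true) ↔
      (w.toList.map (fun ch => String.ofList [ch]) = (dSpec m cap r c).take w.toList.length) := by
    rw [and_comm]
    have h1 := dxScan_spec m r c w.toList 0
    have h0 : ((0 : Nat) : Int) = (0 : Int) := by norm_num
    rw [h0] at h1
    rw [h1, prefix_char m cap r c w.toList (hwcap w hw)]
    constructor <;> intro h j hj <;> simpa using h j hj
  simp only [decide_eq_decide]
  exact hiff
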